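-- pv_equiv track=rewrite | github.com/UH3135/learn_algorithm | Baekjoon/Graph/9204.py | bfs
-- ===== SOURCE A (Python) =====
-- from collections import deque
--
-- def bfs(start, end):
--     q = deque()
--     q.append(start)
--
--     dp = [[[] for _ in range(8)] for _ in range(8)]
--     directions = [(1, 1), (1, -1), (-1, 1), (-1, -1)]
--     dp[start[0]][start[1]].append(start)
--
--     while q:
--         x, y = q.popleft()
--
--         if x == end[0] and y == end[1]:
--             return dp[x][y]
--
--         for direction in directions:
--             for n in range(1, 8):
--                 nx = direction[0] * n + x
--                 ny = direction[1] * n + y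
--
--                 if 0 <= nx < 8 and 0 <= ny < 8 and len(dp[nx][ny]) == 0:
--                     for val in dp[x][y]:
--                         dp[nx][ny].append(val)
--                     dp[nx][ny].append((nx, ny))
--                     q.append((nx, ny))
--     return []
-- ===== SOURCE B (Python) =====
-- # Level-synchronized BFS with a parent dict: no deque, no per-cell path lists;
-- # whole frontier is checked for the end, then expanded into the next frontier,
-- # and the path is rebuilt once by walking parent links back from the end.
-- MOVES = [(dx * n, dy * n) for dx, dy in ((1, 1), (1, -1), (-1, 1), (-1, -1))
--          for n in range(1, 8)]
--
-- def bfs(start, end):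
--     visited = [[False] * 8 for _ in range(8)]
--     visited[start[0]][start[1]] = True
--     parent = {start: None}
--     frontier = [start]
--     while frontier:
--         for cell in frontier:
--             if cell[0] == end[0] and cell[1] == end[1]:
--                 path = []
--                 while cell is not None:
--                     path.append(cell)
--                     cell = parent[cell]
--                 return path[::-1]
--         level = []
--         for x, y in frontier:
--             for mx, my in MOVES:
--                 nx, ny = x + mx, y + my
--                 if 0 <= nx < 8 and 0 <= ny < 8 and not visited[nx][ny]:
--                     visited[nx][ny] = True
--                     parent[(nx, ny)] = (x, y)
--                     level.append((nx, ny))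
--         frontier = level
--     return []
-- ===== Notes on version B (the rewrite author's own statement) =====
-- stated objective: alternative
-- what changed: B replaces A's deque-driven BFS that copies a full path list into every discovered cell by a level-synchronized BFS: a precomputed flat move list, a parent dict plus a visited grid, whole-frontier end check, next frontier built per level, and the path reconstructed once by walking parent links backwards and reversing.
import Mathlib
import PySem

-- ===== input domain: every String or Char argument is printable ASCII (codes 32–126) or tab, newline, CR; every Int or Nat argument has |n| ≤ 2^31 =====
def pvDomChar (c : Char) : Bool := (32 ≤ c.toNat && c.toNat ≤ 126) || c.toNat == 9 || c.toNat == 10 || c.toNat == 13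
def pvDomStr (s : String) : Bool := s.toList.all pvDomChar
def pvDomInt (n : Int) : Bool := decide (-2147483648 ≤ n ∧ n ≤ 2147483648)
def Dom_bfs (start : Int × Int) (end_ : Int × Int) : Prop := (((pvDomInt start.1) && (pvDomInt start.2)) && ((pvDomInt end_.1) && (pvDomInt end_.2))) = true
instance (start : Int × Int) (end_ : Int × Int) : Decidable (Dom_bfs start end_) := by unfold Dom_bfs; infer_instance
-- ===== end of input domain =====

-- B replaces A's deque BFS with per-cell accumulated path lists by a level-synchronized BFS:
-- flat precomputed move list, parent dict + visited grid, whole-frontier end check per level,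
-- and one final backtracking pass that rebuilds the path (alternative, not timed faster).

-- ===== PORT A =====
-- Python list index semantics for the 8×8 grids: an index i with -8 ≤ i < 0 reads row/col i+8.
def norm8 (i : Int) : Int := if i < 0 then i + 8 else i
def nkey (c : Int × Int) : Int × Int := (norm8 c.1, norm8 c.2)
-- dp (list of lists of paths) modelled as a function from (row, col) to the stored path.
def updA (g : Int × Int → List (Int × Int)) (k : Int × Int) (v : List (Int × Int)) :
    Int × Int → List (Int × Int) := fun k' => if k' = k then v else g k'
def dirsA : List (Int × Int) := [(1, 1), (1, -1), (-1, 1), (-1, -1)]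
-- one inner-loop body: candidate (direction d, distance n) from popped (x, y)
def stepA (x y : Int) (s : (Int × Int → List (Int × Int)) × List (Int × Int)) (d : Int × Int)
    (n : Int) : (Int × Int → List (Int × Int)) × List (Int × Int) :=
  let nx := d.1 * n + x
  let ny := d.2 * n + y
  if 0 ≤ nx ∧ nx < 8 ∧ 0 ≤ ny ∧ ny < 8 ∧ s.1 (nx, ny) = [] then
    (updA s.1 (nx, ny) (s.1 (nkey (x, y)) ++ [(nx, ny)]), s.2 ++ [(nx, ny)])
  else s
def expandA (x y : Int) (s : (Int × Int → List (Int × Int)) × List (Int × Int)) :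
    (Int × Int → List (Int × Int)) × List (Int × Int) :=
  dirsA.foldl (fun s d => (PySem.List.pyRange 1 8 1).foldl (fun s n => stepA x y s d n) s) s
-- the while loop, fuel-bounded (each pop consumes one unit; at most 65 cells ever enter the queue)
def loopA : Nat → Int × Int → (Int × Int → List (Int × Int)) → List (Int × Int) → List (Int × Int)
  | 0, _, _, _ => []
  | _ + 1, _, _, [] => []
  | f + 1, e, g, c :: rest =>
    if c.1 = e.1 ∧ c.2 = e.2 then g (nkey c)
    else
      let s := expandA c.1 c.2 (g, rest)
      loopA f e s.1 s.2
def bfs (start : Int × Int) (end_ : Int × Int) : List (Int × Int) :=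
  loopA 200 end_ (updA (fun _ => []) (nkey start) [start]) [start]

-- ===== PORT B =====
-- visited (8×8 boolean grid) modelled as a function; parent dict as a function to Option
-- (a key that was never inserted and the stored None both read as none; Source B only ever
-- looks parent up at keys it inserted, so the two are indistinguishable).
def updV (v : Int × Int → Bool) (k : Int × Int) (b : Bool) : Int × Int → Bool :=
  fun k' => if k' = k then b else v k'
def updP (p : Int × Int → Option (Int × Int)) (k : Int × Int) (x : Option (Int × Int)) :
    Int × Int → Option (Int × Int) := fun k' => if k' = k then x else p k'
-- MOVES = [(dx*n, dy*n) for dx, dy in ((1,1),(1,-1),(-1,1),(-1,-1)) for n in range(1,8)]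
def movesB : List (Int × Int) :=
  [((1 : Int), (1 : Int)), (1, -1), (-1, 1), (-1, -1)].flatMap
    (fun d => (PySem.List.pyRange 1 8 1).map (fun n => (d.1 * n, d.2 * n)))
-- body of the single flat move loop expanding (x, y)
def stepB (x y : Int)
    (s : (Int × Int → Bool) × (Int × Int → Option (Int × Int)) × List (Int × Int))
    (m : Int × Int) :
    (Int × Int → Bool) × (Int × Int → Option (Int × Int)) × List (Int × Int) :=
  let nx := x + m.1
  let ny := y + m.2
  if 0 ≤ nx ∧ nx < 8 ∧ 0 ≤ ny ∧ ny < 8 ∧ s.1 (nx, ny) = false then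
    (updV s.1 (nx, ny) true, updP s.2.1 (nx, ny) (some (x, y)), s.2.2 ++ [(nx, ny)])
  else s
def expandB (x y : Int)
    (s : (Int × Int → Bool) × (Int × Int → Option (Int × Int)) × List (Int × Int)) :
    (Int × Int → Bool) × (Int × Int → Option (Int × Int)) × List (Int × Int) :=
  movesB.foldl (fun s m => stepB x y s m) s
-- `for cell in frontier: if cell[0] == end[0] and cell[1] == end[1]: …` (first hit, if any)
def findHit (e : Int × Int) : List (Int × Int) → Option (Int × Int)
  | [] => none
  | c :: rest => if c.1 == e.1 && c.2 == e.2 then some c else findHit e rest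
-- the backtracking while loop (cur runs along parent links until None), fuel-bounded
def backB : Nat → (Int × Int → Option (Int × Int)) → Option (Int × Int) → List (Int × Int) →
    List (Int × Int)
  | _, _, none, path => path.reverse
  | 0, _, some _, path => path.reverse
  | f + 1, par, some c, path => backB f par (par c) (path ++ [c])
-- the outer while loop over whole frontiers, fuel-bounded (one unit per level)
def levelLoop : Nat → Int × Int → (Int × Int → Bool) → (Int × Int → Option (Int × Int)) →
    List (Int × Int) → List (Int × Int)
  | 0, _, _, _, _ => []
  | _ + 1, _, _, _, [] => []
  | f + 1, e, vis, par, c :: rest =>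
    match findHit e (c :: rest) with
    | some hit => backB 200 par (some hit) []
    | none =>
        let s := (c :: rest).foldl (fun s (cell : Int × Int) => expandB cell.1 cell.2 s) (vis, par, [])
        levelLoop f e s.1 s.2.1 s.2.2
def bfs_alt (start : Int × Int) (end_ : Int × Int) : List (Int × Int) :=
  levelLoop 200 end_ (updV (fun _ => false) (nkey start) true) (fun _ => none) [start]

-- ===== PRECONDITION & SPEC =====
-- Pre_ excludes exactly the starts whose coordinates are outside [-8, 8), on which Python A
-- raises IndexError when indexing the 8×8 dp grid (and Python B raises identically).
def Pre_bfs (start : Int × Int) (end_ : Int × Int) : Prop :=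
  -8 ≤ start.1 ∧ start.1 < 8 ∧ -8 ≤ start.2 ∧ start.2 < 8
instance (start : Int × Int) (end_ : Int × Int) : Decidable (Pre_bfs start end_) := by
  unfold Pre_bfs; infer_instance
def pvWitness_bfs : (Int × Int) × (Int × Int) := ((0, 0), (7, 7))
def Spec_bfs (start : Int × Int) (end_ : Int × Int) (out : List (Int × Int)) : Prop :=
  out = bfs_alt start end_
instance (start : Int × Int) (end_ : Int × Int) (out : List (Int × Int)) :
    Decidable (Spec_bfs start end_ out) := by unfold Spec_bfs; infer_instance

-- ===== CLAIM (what is proved, stated in full; the proofs are below) =====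
def Claim_equal_bfs : Prop := ∀ (start : Int × Int) (end_ : Int × Int),
  Dom_bfs start end_ → Pre_bfs start end_ → Spec_bfs start end_ (bfs start end_)

-- ===== LEMMAS AND PROOFS =====

-- the 64 board cells, and the count of still-empty dp slots (A's notion of "unvisited")
def cells : List (Int × Int) :=
  (List.range 8).flatMap (fun i => (List.range 8).map (fun j => (Int.ofNat i, Int.ofNat j)))
def unvis (g : Int × Int → List (Int × Int)) : Nat := cells.countP (fun c => g c = [])

theorem cells_nodup : cells.Nodup := by decide

theorem mem_cells (a b : Int) (ha0 : 0 ≤ a) (ha : a < 8) (hb0 : 0 ≤ b) (hb : b < 8) :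
    (a, b) ∈ cells := by
  obtain ⟨a', rfl⟩ : ∃ a' : Nat, a = (a' : Int) := ⟨a.toNat, by omega⟩
  obtain ⟨b', rfl⟩ : ∃ b' : Nat, b = (b' : Int) := ⟨b.toNat, by omega⟩
  unfold cells
  refine List.mem_flatMap.mpr ⟨a', List.mem_range.mpr (by exact_mod_cast ha), ?_⟩
  exact List.mem_map.mpr ⟨b', List.mem_range.mpr (by exact_mod_cast hb), rfl⟩

theorem countP_update {α : Type} [DecidableEq α] :
    ∀ (l : List α), l.Nodup → ∀ (a : α), a ∈ l → ∀ (f g : α → Bool),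
      (∀ x, x ≠ a → g x = f x) → f a = true → g a = false → l.countP g + 1 = l.countP f := by
  intro l
  induction l with
  | nil => simp
  | cons b l ih =>
    intro hnd a ha f g hxy hfa hga
    rw [List.countP_cons, List.countP_cons]
    rcases List.mem_cons.mp ha with rfl | ha'
    · have hl : ∀ x ∈ l, g x = f x := fun x hx =>
        hxy x (by rintro rfl; exact (List.nodup_cons.mp hnd).1 hx)
      rw [List.countP_congr (fun x hx => by rw [hl x hx])]
      simp [hfa, hga]
    · have hba : b ≠ a := by rintro rfl; exact (List.nodup_cons.mp hnd).1 ha'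
      rw [hxy b hba]
      have := ih (List.nodup_cons.mp hnd).2 a ha' f g hxy hfa hga
      omega

theorem unvis_upd (g : Int × Int → List (Int × Int)) (k : Int × Int)
    (v : List (Int × Int)) (hk : k ∈ cells) (hg : g k = []) (hv : v ≠ []) :
    unvis (updA g k v) + 1 = unvis g := by
  refine countP_update cells cells_nodup k hk _ _ ?_ (by simp [hg]) (by simp [updA, hv])
  intro x hx
  simp [updA, hx]

-- the parent chain from a cell back to the start, as B's backtracking visits it
inductive Chain (par : Int × Int → Option (Int × Int)) : Int × Int → List (Int × Int) → Prop
  | nil (c : Int × Int) : par c = none → Chain par c [c]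
  | cons (c p : Int × Int) (l : List (Int × Int)) :
      par c = some p → Chain par p l → Chain par c (c :: l)

theorem chain_ne_nil (par : Int × Int → Option (Int × Int)) (c : Int × Int)
    (l : List (Int × Int)) (h : Chain par c l) : l ≠ [] := by
  cases h <;> simp

theorem backB_chain (par : Int × Int → Option (Int × Int)) (c : Int × Int)
    (l : List (Int × Int)) (h : Chain par c l) :
    ∀ (f : Nat) (path : List (Int × Int)), l.length ≤ f →
      backB f par (some c) path = (path ++ l).reverse := by
  induction h with
  | nil c hn =>
      intro f path hf
      match f, hf with
      | f + 1, _ => simp [backB, hn]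
  | cons c p l hp _ ih =>
      intro f path hf
      match f, hf with
      | f + 1, hf =>
        simp only [backB, hp]
        rw [ih f (path ++ [c]) (by simpa using Nat.lt_succ_iff.mp (by simpa using hf))]
        simp

theorem chain_update (par : Int × Int → Option (Int × Int)) (vis : Int × Int → Bool)
    (c : Int × Int) (l : List (Int × Int)) (h : Chain par c l)
    (hvis : ∀ x ∈ l, vis (nkey x) = true) (k : Int × Int) (hk : vis (nkey k) = false)
    (v : Option (Int × Int)) : Chain (updP par k v) c l := by
  induction h with
  | nil c hn =>
      refine Chain.nil c ?_
      have : c ≠ k := fun he => by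
        have := hvis c (by simp); rw [he, hk] at this; cases this
      simpa [updP, this] using hn
  | cons c p l hp hch ih =>
      refine Chain.cons c p l ?_ (ih fun x hx => hvis x (by simp [hx]))
      have : c ≠ k := fun he => by
        have := hvis c (by simp); rw [he, hk] at this; cases this
      simpa [updP, this] using hp

-- invariant relating A's dp grid to B's visited grid + parent dict, over a queue of cells
structure QRel (g : Int × Int → List (Int × Int)) (vis : Int × Int → Bool)
    (par : Int × Int → Option (Int × Int)) (q : List (Int × Int)) : Prop where
  emp : ∀ k, g k = [] ↔ vis k = false
  chainq : ∀ e ∈ q, Chain par e (g (nkey e)).reverse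
  visq : ∀ e ∈ q, ∀ x ∈ g (nkey e), vis (nkey x) = true
  lenq : ∀ e ∈ q, (g (nkey e)).length + unvis g ≤ 65

-- in-flight invariant while the cell (x, y) is being expanded
structure ERel (x y : Int) (sA : (Int × Int → List (Int × Int)) × List (Int × Int))
    (sB : (Int × Int → Bool) × (Int × Int → Option (Int × Int)) × List (Int × Int)) : Prop where
  qeq : sA.2 = sB.2.2
  rel : QRel sA.1 sB.1 sB.2.1 sA.2
  chainc : Chain sB.2.1 (x, y) (sA.1 (nkey (x, y))).reverse
  visc : ∀ z ∈ sA.1 (nkey (x, y)), sB.1 (nkey z) = true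
  lenc : (sA.1 (nkey (x, y))).length + unvis sA.1 ≤ 65

theorem norm8_of_nonneg (i : Int) (h : 0 ≤ i) : norm8 i = i := by
  simp [norm8]; omega

theorem step_rel (x y : Int) (M : Nat)
    (sA : (Int × Int → List (Int × Int)) × List (Int × Int))
    (sB : (Int × Int → Bool) × (Int × Int → Option (Int × Int)) × List (Int × Int))
    (d : Int × Int) (n : Int) (hr : ERel x y sA sB)
    (hm : sA.2.length + unvis sA.1 = M) :
    ERel x y (stepA x y sA d n) (stepB x y sB (d.1 * n, d.2 * n)) ∧
      (stepA x y sA d n).2.length + unvis (stepA x y sA d n).1 = M := by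
  unfold stepA stepB
  simp only
  rw [show x + (d.1 * n) = d.1 * n + x from by ring,
      show y + (d.2 * n) = d.2 * n + y from by ring]
  set nx := d.1 * n + x with hnx
  set ny := d.2 * n + y with hny
  by_cases hin : 0 ≤ nx ∧ nx < 8 ∧ 0 ≤ ny ∧ ny < 8 ∧ sA.1 (nx, ny) = []
  · have hvfalse : sB.1 (nx, ny) = false := (hr.rel.emp (nx, ny)).mp hin.2.2.2.2
    have hguardB : 0 ≤ nx ∧ nx < 8 ∧ 0 ≤ ny ∧ ny < 8 ∧ sB.1 (nx, ny) = false :=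
      ⟨hin.1, hin.2.1, hin.2.2.1, hin.2.2.2.1, hvfalse⟩
    rw [if_pos hin, if_pos hguardB]
    have hkey : nkey (nx, ny) = (nx, ny) := by
      simp [nkey, norm8_of_nonneg nx hin.1, norm8_of_nonneg ny hin.2.2.1]
    have hcell : (nx, ny) ∈ cells := mem_cells nx ny hin.1 hin.2.1 hin.2.2.1 hin.2.2.2.1
    -- the popped cell's slot is non-empty, hence distinct from the freshly filled slot
    have hcnonempty : sA.1 (nkey (x, y)) ≠ [] := by
      intro he
      have := hr.chainc
      rw [he] at this
      exact chain_ne_nil _ _ _ this rfl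
    have hne : nkey (x, y) ≠ (nx, ny) := fun he => hcnonempty (by rw [he]; exact hin.2.2.2.2)
    have hgc : updA sA.1 (nx, ny) (sA.1 (nkey (x, y)) ++ [(nx, ny)]) (nkey (x, y)) =
        sA.1 (nkey (x, y)) := by simp [updA, hne]
    have hkfalse : sB.1 (nkey (nx, ny)) = false := by rw [hkey]; exact hvfalse
    have huv : unvis (updA sA.1 (nx, ny) (sA.1 (nkey (x, y)) ++ [(nx, ny)])) + 1 =
        unvis sA.1 := unvis_upd sA.1 (nx, ny) _ hcell hin.2.2.2.2 (by simp)
    refine ⟨⟨by simp [hr.qeq], ?_, ?_, ?_, ?_⟩, ?_⟩ <;> (try dsimp only)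
    · constructor
      · intro k
        by_cases hk : k = (nx, ny) <;> simp [updA, updV, hk, hr.rel.emp k]
      · intro e he
        rcases List.mem_append.mp he with he | he
        · have hch := hr.rel.chainq e he
          have hnonempty : sA.1 (nkey e) ≠ [] := by
            intro hz; rw [hz] at hch; exact chain_ne_nil _ _ _ hch rfl
          have hnee : nkey e ≠ (nx, ny) := fun hk => hnonempty (by rw [hk]; exact hin.2.2.2.2)
          have : updA sA.1 (nx, ny) (sA.1 (nkey (x, y)) ++ [(nx, ny)]) (nkey e) =
              sA.1 (nkey e) := by simp [updA, hnee]
          rw [this]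
          exact chain_update _ sB.1 _ _ hch
            (fun z hz => hr.rel.visq e he z (List.mem_reverse.mp hz)) _ hkfalse _
        · have he' : e = (nx, ny) := by simpa using he
          subst he'
          rw [hkey]
          rw [show updA sA.1 (nx, ny) (sA.1 (nkey (x, y)) ++ [(nx, ny)]) (nx, ny) =
              sA.1 (nkey (x, y)) ++ [(nx, ny)] by simp [updA]]
          simp only [List.reverse_append, List.reverse_cons, List.reverse_nil, List.nil_append,
            List.singleton_append]
          refine Chain.cons _ (x, y) _ (by simp [updP]) ?_
          exact chain_update _ sB.1 _ _ hr.chainc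
            (fun z hz => hr.visc z (List.mem_reverse.mp hz)) _ hkfalse _
      · intro e he z hz
        rcases List.mem_append.mp he with he | he
        · have hch := hr.rel.chainq e he
          have hnonempty : sA.1 (nkey e) ≠ [] := by
            intro hz'; rw [hz'] at hch; exact chain_ne_nil _ _ _ hch rfl
          have hnee : nkey e ≠ (nx, ny) := fun hk => hnonempty (by rw [hk]; exact hin.2.2.2.2)
          rw [show updA sA.1 (nx, ny) (sA.1 (nkey (x, y)) ++ [(nx, ny)]) (nkey e) =
              sA.1 (nkey e) by simp [updA, hnee]] at hz
          have := hr.rel.visq e he z hz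
          by_cases hk : nkey z = (nx, ny) <;> simp [updV, hk, this]
        · have he' : e = (nx, ny) := by simpa using he
          subst he'
          rw [hkey] at hz
          rw [show updA sA.1 (nx, ny) (sA.1 (nkey (x, y)) ++ [(nx, ny)]) (nx, ny) =
              sA.1 (nkey (x, y)) ++ [(nx, ny)] by simp [updA]] at hz
          rcases List.mem_append.mp hz with hz | hz
          · have := hr.visc z hz
            by_cases hk : nkey z = (nx, ny) <;> simp [updV, hk, this]
          · have hz' : z = (nx, ny) := by simpa using hz
            subst hz'
            simp [updV, hkey]
      · intro e he
        rcases List.mem_append.mp he with he | he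
        · have hch := hr.rel.chainq e he
          have hnonempty : sA.1 (nkey e) ≠ [] := by
            intro hz; rw [hz] at hch; exact chain_ne_nil _ _ _ hch rfl
          have hnee : nkey e ≠ (nx, ny) := fun hk => hnonempty (by rw [hk]; exact hin.2.2.2.2)
          rw [show updA sA.1 (nx, ny) (sA.1 (nkey (x, y)) ++ [(nx, ny)]) (nkey e) =
              sA.1 (nkey e) by simp [updA, hnee]]
          have := hr.rel.lenq e he
          omega
        · have he' : e = (nx, ny) := by simpa using he
          subst he'
          rw [hkey]
          rw [show updA sA.1 (nx, ny) (sA.1 (nkey (x, y)) ++ [(nx, ny)]) (nx, ny) =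
              sA.1 (nkey (x, y)) ++ [(nx, ny)] by simp [updA]]
          have := hr.lenc
          simp only [List.length_append, List.length_cons, List.length_nil]
          omega
    · rw [hgc]
      exact chain_update _ sB.1 _ _ hr.chainc
        (fun z hz => hr.visc z (List.mem_reverse.mp hz)) _ hkfalse _
    · intro z hz
      rw [hgc] at hz
      have := hr.visc z hz
      by_cases hk : nkey z = (nx, ny) <;> simp [updV, hk, this]
    · rw [hgc]
      have := hr.lenc
      omega
    · simp only [List.length_append, List.length_cons, List.length_nil]
      omega
  · have hguardB : ¬ (0 ≤ nx ∧ nx < 8 ∧ 0 ≤ ny ∧ ny < 8 ∧ sB.1 (nx, ny) = false) := by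
      intro h
      exact hin ⟨h.1, h.2.1, h.2.2.1, h.2.2.2.1, (hr.rel.emp (nx, ny)).mpr h.2.2.2.2⟩
    rw [if_neg hin, if_neg hguardB]
    exact ⟨hr, hm⟩

theorem foldl_rel {α β ι : Type} (R : α → β → Prop) (f : α → ι → α) (g : β → ι → β)
    (hstep : ∀ a b i, R a b → R (f a i) (g b i)) :
    ∀ (l : List ι) (a : α) (b : β), R a b → R (l.foldl f a) (l.foldl g b)
  | [], _, _, h => h
  | i :: l, a, b, h => foldl_rel R f g hstep l (f a i) (g b i) (hstep a b i h)

theorem foldl_flatMap' {α β γ : Type} (l : List α) (f : α → List β) (g : γ → β → γ) :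
    ∀ (init : γ), (l.flatMap f).foldl g init = l.foldl (fun s a => (f a).foldl g s) init := by
  induction l with
  | nil => intro init; rfl
  | cons a l ih =>
      intro init
      simp only [List.flatMap_cons, List.foldl_append, List.foldl_cons]
      exact ih _

-- B's single flat-move fold, re-bracketed as the corresponding (direction, distance) nest
theorem expandB_eq (x y : Int)
    (s : (Int × Int → Bool) × (Int × Int → Option (Int × Int)) × List (Int × Int)) :
    expandB x y s = dirsA.foldl
      (fun s d => (PySem.List.pyRange 1 8 1).foldl (fun s n => stepB x y s (d.1 * n, d.2 * n)) s)
      s := by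
  unfold expandB movesB dirsA
  rw [foldl_flatMap']
  simp only [List.foldl_map]

theorem expand_rel (x y : Int) (M : Nat)
    (sA : (Int × Int → List (Int × Int)) × List (Int × Int))
    (sB : (Int × Int → Bool) × (Int × Int → Option (Int × Int)) × List (Int × Int))
    (hr : ERel x y sA sB) (hm : sA.2.length + unvis sA.1 = M) :
    ERel x y (expandA x y sA) (expandB x y sB) ∧
      (expandA x y sA).2.length + unvis (expandA x y sA).1 = M := by
  rw [expandB_eq]
  unfold expandA
  exact foldl_rel
    (fun a b => ERel x y a b ∧ a.2.length + unvis a.1 = M)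
    (fun s d => (PySem.List.pyRange 1 8 1).foldl (fun s n => stepA x y s d n) s)
    (fun s d => (PySem.List.pyRange 1 8 1).foldl (fun s n => stepB x y s (d.1 * n, d.2 * n)) s)
    (fun a b d h =>
      foldl_rel (fun a b => ERel x y a b ∧ a.2.length + unvis a.1 = M)
        (fun s n => stepA x y s d n) (fun s n => stepB x y s (d.1 * n, d.2 * n))
        (fun a b n h => step_rel x y M a b d n h.1 h.2) _ a b h)
    dirsA sA sB ⟨hr, hm⟩

-- locality: an expansion only appends to its queue component, independently of the queue
theorem foldl_pres {σ ι : Type} (P : σ → Prop) (f : σ → ι → σ)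
    (h : ∀ s i, P s → P (f s i)) :
    ∀ (l : List ι) (s : σ), P s → P (l.foldl f s)
  | [], _, hs => hs
  | i :: l, s, hs => foldl_pres P f h l (f s i) (h s i hs)

theorem foldl_loc {γ δ ι : Type} (f : γ × List δ → ι → γ × List δ)
    (hf : ∀ (g : γ) (q : List δ) (i : ι),
      f (g, q) i = ((f (g, []) i).1, q ++ (f (g, []) i).2)) :
    ∀ (l : List ι) (g : γ) (q : List δ),
      l.foldl f (g, q) = ((l.foldl f (g, [])).1, q ++ (l.foldl f (g, [])).2) := by
  intro l
  induction l with
  | nil => intro g q; simp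
  | cons i l ih =>
      intro g q
      show l.foldl f (f (g, q) i) = _
      rw [hf g q i, ih (f (g, []) i).1 (q ++ (f (g, []) i).2)]
      have : l.foldl f (f (g, []) i) =
          ((l.foldl f ((f (g, []) i).1, [])).1,
            (f (g, []) i).2 ++ (l.foldl f ((f (g, []) i).1, [])).2) := by
        conv_lhs => rw [show f (g, []) i = ((f (g, []) i).1, (f (g, []) i).2) from rfl]
        exact ih (f (g, []) i).1 (f (g, []) i).2
      show _ = (((l.foldl f (f (g, []) i))).1, q ++ ((l.foldl f (f (g, []) i))).2)
      rw [this]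
      simp

theorem stepA_loc (x y : Int) (g : Int × Int → List (Int × Int)) (q : List (Int × Int))
    (d : Int × Int) (n : Int) :
    stepA x y (g, q) d n = ((stepA x y (g, []) d n).1, q ++ (stepA x y (g, []) d n).2) := by
  unfold stepA
  by_cases h : 0 ≤ d.1 * n + x ∧ d.1 * n + x < 8 ∧ 0 ≤ d.2 * n + y ∧ d.2 * n + y < 8 ∧
      g (d.1 * n + x, d.2 * n + y) = [] <;> simp [h]

theorem expandA_loc (x y : Int) (g : Int × Int → List (Int × Int)) (q : List (Int × Int)) :
    expandA x y (g, q) = ((expandA x y (g, [])).1, q ++ (expandA x y (g, [])).2) := by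
  unfold expandA
  exact foldl_loc _
    (fun g q d => foldl_loc _ (fun g q n => stepA_loc x y g q d n) _ g q) dirsA g q

theorem stepB_loc (x y : Int) (v : Int × Int → Bool) (p : Int × Int → Option (Int × Int))
    (q : List (Int × Int)) (m : Int × Int) :
    stepB x y (v, p, q) m = ((stepB x y (v, p, []) m).1, (stepB x y (v, p, []) m).2.1,
      q ++ (stepB x y (v, p, []) m).2.2) := by
  unfold stepB
  by_cases h : 0 ≤ x + m.1 ∧ x + m.1 < 8 ∧ 0 ≤ y + m.2 ∧ y + m.2 < 8 ∧
      v (x + m.1, y + m.2) = false <;> simp [h]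

theorem foldl_loc3 {γ₁ γ₂ δ ι : Type} (f : γ₁ × γ₂ × List δ → ι → γ₁ × γ₂ × List δ)
    (hf : ∀ (a : γ₁) (b : γ₂) (q : List δ) (i : ι),
      f (a, b, q) i = ((f (a, b, []) i).1, (f (a, b, []) i).2.1, q ++ (f (a, b, []) i).2.2)) :
    ∀ (l : List ι) (a : γ₁) (b : γ₂) (q : List δ),
      l.foldl f (a, b, q) = ((l.foldl f (a, b, [])).1, (l.foldl f (a, b, [])).2.1,
        q ++ (l.foldl f (a, b, [])).2.2) := by
  intro l
  induction l with
  | nil => intro a b q; simp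
  | cons i l ih =>
      intro a b q
      show l.foldl f (f (a, b, q) i) = _
      rw [hf a b q i,
        ih (f (a, b, []) i).1 (f (a, b, []) i).2.1 (q ++ (f (a, b, []) i).2.2)]
      have : l.foldl f (f (a, b, []) i) =
          ((l.foldl f ((f (a, b, []) i).1, (f (a, b, []) i).2.1, [])).1,
            (l.foldl f ((f (a, b, []) i).1, (f (a, b, []) i).2.1, [])).2.1,
            (f (a, b, []) i).2.2 ++
              (l.foldl f ((f (a, b, []) i).1, (f (a, b, []) i).2.1, [])).2.2) := by
        conv_lhs => rw [show f (a, b, []) i =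
          ((f (a, b, []) i).1, (f (a, b, []) i).2.1, (f (a, b, []) i).2.2) from rfl]
        exact ih (f (a, b, []) i).1 (f (a, b, []) i).2.1 (f (a, b, []) i).2.2
      show _ = ((l.foldl f (f (a, b, []) i)).1, (l.foldl f (f (a, b, []) i)).2.1,
        q ++ (l.foldl f (f (a, b, []) i)).2.2)
      rw [this]
      simp

theorem expandB_loc (x y : Int) (v : Int × Int → Bool) (p : Int × Int → Option (Int × Int))
    (q : List (Int × Int)) :
    expandB x y (v, p, q) = ((expandB x y (v, p, [])).1, (expandB x y (v, p, [])).2.1,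
      q ++ (expandB x y (v, p, [])).2.2) := by
  unfold expandB
  exact foldl_loc3 _ (fun a b q m => stepB_loc x y a b q m) movesB v p q

-- an expansion never changes an already non-empty dp slot
theorem expandA_keep (x y : Int) (g : Int × Int → List (Int × Int)) (q : List (Int × Int))
    (k : Int × Int) (hk : g k ≠ []) : (expandA x y (g, q)).1 k = g k := by
  unfold expandA
  refine foldl_pres (fun s => s.1 k = g k)
    (fun s d => (PySem.List.pyRange 1 8 1).foldl (fun s n => stepA x y s d n) s) ?_ dirsA (g, q) rfl
  intro s d hs
  refine foldl_pres (fun s => s.1 k = g k) (fun s n => stepA x y s d n) ?_ _ s hs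
  intro s n hs
  unfold stepA
  by_cases h : 0 ≤ d.1 * n + x ∧ d.1 * n + x < 8 ∧ 0 ≤ d.2 * n + y ∧ d.2 * n + y < 8 ∧
      s.1 (d.1 * n + x, d.2 * n + y) = []
  · have hne : k ≠ (d.1 * n + x, d.2 * n + y) := by
      intro he; rw [← he] at h; rw [hs] at h; exact hk h.2.2.2.2
    simp [h, updA, hne, hs]
  · simp [h, hs]

theorem findHit_cons (e c : Int × Int) (l : List (Int × Int)) :
    findHit e (c :: l) = if c.1 = e.1 ∧ c.2 = e.2 then some c else findHit e l := by
  by_cases h : c.1 = e.1 ∧ c.2 = e.2 <;> simp [findHit, h]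

theorem findHit_mem (e : Int × Int) :
    ∀ (l : List (Int × Int)) (hit : Int × Int), findHit e l = some hit → hit ∈ l := by
  intro l
  induction l with
  | nil => intro hit h; cases h
  | cons c l ih =>
      intro hit h
      rw [findHit_cons] at h
      split at h
      · cases h; simp
      · exact List.mem_cons_of_mem _ (ih hit h)

theorem loopA_nil (f : Nat) (e : Int × Int) (g : Int × Int → List (Int × Int)) :
    loopA f e g [] = [] := by
  cases f <;> rfl

-- inner lemma: running A's pop loop through one whole frontier F (queue = F ++ N)
theorem inner_eq (e : Int × Int) :
    ∀ (F : List (Int × Int)) (g : Int × Int → List (Int × Int)) (vis : Int × Int → Bool)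
      (par : Int × Int → Option (Int × Int)) (N : List (Int × Int)) (fA : Nat),
      QRel g vis par (F ++ N) → (F ++ N).length + unvis g ≤ fA →
      ((∀ hit, findHit e F = some hit → loopA fA e g (F ++ N) = g (nkey hit)) ∧
        (findHit e F = none →
          loopA fA e g (F ++ N) =
            loopA (fA - F.length) e (F.foldl (fun s c => expandA c.1 c.2 s) (g, N)).1
              (F.foldl (fun s c => expandA c.1 c.2 s) (g, N)).2 ∧
          (F.foldl (fun s c => expandB c.1 c.2 s) (vis, par, N)).2.2 =
            (F.foldl (fun s c => expandA c.1 c.2 s) (g, N)).2 ∧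
          QRel (F.foldl (fun s c => expandA c.1 c.2 s) (g, N)).1
            (F.foldl (fun s c => expandB c.1 c.2 s) (vis, par, N)).1
            (F.foldl (fun s c => expandB c.1 c.2 s) (vis, par, N)).2.1
            (F.foldl (fun s c => expandA c.1 c.2 s) (g, N)).2 ∧
          (F.foldl (fun s c => expandA c.1 c.2 s) (g, N)).2.length +
              unvis (F.foldl (fun s c => expandA c.1 c.2 s) (g, N)).1 + F.length =
            (F ++ N).length + unvis g)) := by
  intro F
  induction F with
  | nil =>
      intro g vis par N fA hrel hfa
      constructor
      · intro hit h
        simp [findHit] at h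
      · intro _
        exact ⟨rfl, rfl, hrel, by simp⟩
  | cons c F' ih =>
      intro g vis par N fA hrel hfa
      simp only [List.cons_append] at hrel hfa ⊢
      have hfa1 : 1 ≤ fA := by
        simp only [List.length_cons] at hfa
        omega
      obtain ⟨f', rfl⟩ : ∃ f', fA = f' + 1 := ⟨fA - 1, by omega⟩
      have hloop : loopA (f' + 1) e g (c :: (F' ++ N)) =
          if c.1 = e.1 ∧ c.2 = e.2 then g (nkey c)
          else loopA f' e (expandA c.1 c.2 (g, F' ++ N)).1 (expandA c.1 c.2 (g, F' ++ N)).2 :=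
        rfl
      by_cases hp : c.1 = e.1 ∧ c.2 = e.2
      · constructor
        · intro hit hh
          rw [findHit_cons, if_pos hp] at hh
          cases hh
          simpa [hp] using hloop
        · intro hh
          rw [findHit_cons, if_pos hp] at hh
          cases hh
      · -- c is not the end: A expands it, both folds step once
        have hstep : ERel c.1 c.2 (g, F' ++ N) (vis, par, F' ++ N) := by
          refine ⟨rfl, ⟨hrel.emp, ?_, ?_, ?_⟩, ?_, ?_, ?_⟩
          · intro e' he'; exact hrel.chainq e' (by simp [he'])
          · intro e' he'; exact hrel.visq e' (by simp [he'])
          · intro e' he'; exact hrel.lenq e' (by simp [he'])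
          · simpa using hrel.chainq c (by simp)
          · simpa using hrel.visq c (by simp)
          · simpa using hrel.lenq c (by simp)
        obtain ⟨hrel1, hm1⟩ := expand_rel c.1 c.2 ((F' ++ N).length + unvis g)
          (g, F' ++ N) (vis, par, F' ++ N) hstep rfl
        -- locality: the in-loop expansions and the fold-step expansions differ only by the
        -- pending prefix F' of the queue
        have hlA : expandA c.1 c.2 (g, F' ++ N) =
            ((expandA c.1 c.2 (g, N)).1, F' ++ (expandA c.1 c.2 (g, N)).2) := by
          rw [expandA_loc c.1 c.2 g (F' ++ N), expandA_loc c.1 c.2 g N]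
          simp
        have hlB : expandB c.1 c.2 (vis, par, F' ++ N) =
            ((expandB c.1 c.2 (vis, par, N)).1, (expandB c.1 c.2 (vis, par, N)).2.1,
              F' ++ (expandB c.1 c.2 (vis, par, N)).2.2) := by
          rw [expandB_loc c.1 c.2 vis par (F' ++ N), expandB_loc c.1 c.2 vis par N]
          simp
        -- queues of the two expansions agree
        have hq1' : (expandB c.1 c.2 (vis, par, N)).2.2 = (expandA c.1 c.2 (g, N)).2 := by
          have h := hrel1.qeq
          rw [hlA, hlB] at h
          simp only at h
          exact (List.append_cancel_left h).symm
        -- the new joint state, with queue F' ++ (new accumulated list)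
        have hrel2 : QRel (expandA c.1 c.2 (g, N)).1 (expandB c.1 c.2 (vis, par, N)).1
            (expandB c.1 c.2 (vis, par, N)).2.1 (F' ++ (expandA c.1 c.2 (g, N)).2) := by
          have := hrel1.rel
          rw [hlA, hlB] at this
          exact this
        have hm2 : (F' ++ (expandA c.1 c.2 (g, N)).2).length +
            unvis (expandA c.1 c.2 (g, N)).1 = (F' ++ N).length + unvis g := by
          rw [hlA] at hm1
          simpa using hm1
        have hfa2 : (F' ++ (expandA c.1 c.2 (g, N)).2).length +
            unvis (expandA c.1 c.2 (g, N)).1 ≤ f' := by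
          have : (c :: (F' ++ N)).length + unvis g ≤ f' + 1 := by simpa using hfa
          simp only [List.length_cons] at this
          omega
        obtain ⟨ihsome, ihnone⟩ := ih (expandA c.1 c.2 (g, N)).1
          (expandB c.1 c.2 (vis, par, N)).1 (expandB c.1 c.2 (vis, par, N)).2.1
          (expandA c.1 c.2 (g, N)).2 f' hrel2 hfa2
        have hloop2 : loopA (f' + 1) e g (c :: (F' ++ N)) =
            loopA f' e (expandA c.1 c.2 (g, N)).1 (F' ++ (expandA c.1 c.2 (g, N)).2) := by
          rw [hloop, if_neg hp, hlA]
        constructor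
        · intro hit hh
          rw [findHit_cons, if_neg hp] at hh
          rw [hloop2, ihsome hit hh]
          -- the found cell's dp slot was non-empty before, hence untouched by the expansion
          have hhit : hit ∈ c :: (F' ++ N) := by
            have := findHit_mem e F' hit hh
            simp [this]
          have hch := hrel.chainq hit hhit
          have hne : g (nkey hit) ≠ [] := by
            intro hz; rw [hz] at hch; exact chain_ne_nil _ _ _ hch rfl
          exact expandA_keep c.1 c.2 g N (nkey hit) hne
        · intro hh
          rw [findHit_cons, if_neg hp] at hh
          obtain ⟨h1, h2, h3, h4⟩ := ihnone hh
          have hfoldA : (c :: F').foldl (fun s c => expandA c.1 c.2 s) (g, N) =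
              F'.foldl (fun s c => expandA c.1 c.2 s) (expandA c.1 c.2 (g, N)) := rfl
          have hfoldB : (c :: F').foldl (fun s c => expandB c.1 c.2 s) (vis, par, N) =
              F'.foldl (fun s c => expandB c.1 c.2 s) (expandB c.1 c.2 (vis, par, N)) := rfl
          have hstA : expandA c.1 c.2 (g, N) =
              ((expandA c.1 c.2 (g, N)).1, (expandA c.1 c.2 (g, N)).2) := rfl
          have hstB : expandB c.1 c.2 (vis, par, N) =
              ((expandB c.1 c.2 (vis, par, N)).1, (expandB c.1 c.2 (vis, par, N)).2.1,
                (expandB c.1 c.2 (vis, par, N)).2.2) := rfl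
          rw [hfoldA, hfoldB, hstA, hstB, hq1']
          refine ⟨?_, h2, h3, ?_⟩
          · rw [hloop2, h1]
            congr 1
            simp only [List.length_cons]
            omega
          · have hlen : (F' ++ (expandA c.1 c.2 (g, N)).2).length =
                F'.length + ((expandA c.1 c.2 (g, N)).2).length := by simp
            simp only [List.length_cons] at hfa ⊢
            omega

-- main lemma: A's pop loop equals B's level loop, level by level
theorem main_eq (e : Int × Int) :
    ∀ (fB : Nat) (g : Int × Int → List (Int × Int)) (vis : Int × Int → Bool)
      (par : Int × Int → Option (Int × Int)) (F : List (Int × Int)) (fA : Nat),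
      QRel g vis par F → F.length + unvis g ≤ fA → F.length + unvis g ≤ fB →
      loopA fA e g F = levelLoop fB e vis par F := by
  intro fB
  induction fB with
  | zero =>
      intro g vis par F fA _ _ hB
      have : F = [] := by
        cases F with
        | nil => rfl
        | cons c F' => simp at hB
      subst this
      rw [loopA_nil]
      rfl
  | succ fB ih =>
      intro g vis par F fA hrel hA hB
      cases F with
      | nil => rw [loopA_nil]; rfl
      | cons c F' =>
          have hq0 : QRel g vis par ((c :: F') ++ []) := by simpa using hrel
          have hA0 : ((c :: F') ++ []).length + unvis g ≤ fA := by simpa using hA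
          obtain ⟨isome, inone⟩ := inner_eq e (c :: F') g vis par [] fA hq0 hA0
          cases hfind : findHit e (c :: F') with
          | some hit =>
              have hlevel : levelLoop (fB + 1) e vis par (c :: F') =
                  backB 200 par (some hit) [] := by
                show (match findHit e (c :: F') with
                  | some hit => backB 200 par (some hit) []
                  | none =>
                      let s := (c :: F').foldl (fun s (cell : Int × Int) => expandB cell.1 cell.2 s)
                        (vis, par, [])
                      levelLoop fB e s.1 s.2.1 s.2.2) = _
                rw [hfind]
              rw [hlevel]
              have hhit : hit ∈ c :: F' := findHit_mem e (c :: F') hit hfind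
              have hch := hrel.chainq hit hhit
              have hlen : ((g (nkey hit)).reverse).length ≤ 200 := by
                have := hrel.lenq hit hhit
                simp only [List.length_reverse]
                omega
              rw [backB_chain par hit _ hch 200 [] hlen]
              have := isome hit hfind
              simp only [List.append_nil] at this
              rw [this]
              simp
          | none =>
              obtain ⟨h1, h2, h3, h4⟩ := inone hfind
              have hlevel : levelLoop (fB + 1) e vis par (c :: F') =
                  levelLoop fB e
                    ((c :: F').foldl (fun s (cell : Int × Int) => expandB cell.1 cell.2 s) (vis, par, [])).1
                    ((c :: F').foldl (fun s (cell : Int × Int) => expandB cell.1 cell.2 s) (vis, par, [])).2.1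
                    ((c :: F').foldl (fun s (cell : Int × Int) => expandB cell.1 cell.2 s) (vis, par, [])).2.2 := by
                show (match findHit e (c :: F') with
                  | some hit => backB 200 par (some hit) []
                  | none =>
                      let s := (c :: F').foldl (fun s (cell : Int × Int) => expandB cell.1 cell.2 s)
                        (vis, par, [])
                      levelLoop fB e s.1 s.2.1 s.2.2) = _
                rw [hfind]
              rw [hlevel, h2]
              have h1' : loopA fA e g (c :: F') =
                  loopA (fA - (c :: F').length) e
                    ((c :: F').foldl (fun s c => expandA c.1 c.2 s) (g, [])).1
                    ((c :: F').foldl (fun s c => expandA c.1 c.2 s) (g, [])).2 := by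
                simpa using h1
              rw [h1']
              simp only [List.append_nil, List.length_cons] at h4
              have hb1 : (c :: F').length = F'.length + 1 := rfl
              refine ih _ _ _ _ _ h3 (by omega) (by omega)

theorem unvis_empty : unvis (fun _ => []) = 64 := by decide

-- ===== VERDICT (by name: the statement is the Claim_ definition above) =====
theorem bfs_spec : Claim_equal_bfs := by
  intro start end_ _ hpre
  unfold Spec_bfs bfs bfs_alt
  have hkmem : nkey start ∈ cells := by
    obtain ⟨h1, h2, h3, h4⟩ := hpre
    refine mem_cells _ _ ?_ ?_ ?_ ?_ <;> simp [norm8] <;> omega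
  have huv : unvis (updA (fun _ => []) (nkey start) [start]) = 63 := by
    have := unvis_upd (fun _ => []) (nkey start) [start] hkmem rfl (by simp)
    rw [unvis_empty] at this
    omega
  refine main_eq end_ 200 _ _ _ [start] 200 ?_ ?_ ?_
  · refine ⟨?_, ?_, ?_, ?_⟩
    · intro k
      by_cases hk : k = nkey start <;> simp [updA, updV, hk]
    · intro c hc
      have hc' : c = start := by simpa using hc
      subst hc'
      rw [show updA (fun _ => []) (nkey c) [c] (nkey c) = [c] by simp [updA]]
      exact Chain.nil c rfl
    · intro c hc x hx
      have hc' : c = start := by simpa using hc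
      subst hc'
      rw [show updA (fun _ => []) (nkey c) [c] (nkey c) = [c] by simp [updA]] at hx
      have hx' : x = c := by simpa using hx
      subst hx'
      simp [updV]
    · intro c hc
      have hc' : c = start := by simpa using hc
      subst hc'
      rw [show updA (fun _ => []) (nkey c) [c] (nkey c) = [c] by simp [updA]]
      rw [huv]
      simp
  · rw [huv]; simp
  · rw [huv]; simp
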